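-- pv_equiv track=rewrite | github.com/Kodsport/sakerhetssm-2020-solutions | krypto/konstig-kloss/solution.py | matvecmul
-- ===== SOURCE A (Python) =====
-- def transpose(m):
--     length = len(m)
--     mt = []
--     for i in range(length):
--         temp = 0
--         for j in range(length):
--             val = (m[j] >> i) & 1
--             temp |= (val << j)
--         mt.append(temp)
--     return mt
--
-- def matvecmul(m, v):
--     length = len(m)
--     res = 0
--     mt = transpose(m)
--     for i in range(length):
--         if (v >> i) & 1:
--             res ^= mt[i]
--     return res
-- ===== SOURCE B (Python) =====
-- def matvecmul(m, v):
--     vm = v & ((1 << len(m)) - 1)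
--     res = 0
--     for j, row in enumerate(m):
--         res |= ((row & vm).bit_count() & 1) << j
--     return res
-- ===== Notes on version B (the rewrite author's own statement) =====
-- stated objective: faster
-- what changed: B drops the explicit bit-by-bit transpose and column-XOR entirely: result bit j is computed directly per row as the parity (popcount & 1) of row & v masked to the matrix width, assembled with disjoint ORs in one pass over the rows.
import Mathlib
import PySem

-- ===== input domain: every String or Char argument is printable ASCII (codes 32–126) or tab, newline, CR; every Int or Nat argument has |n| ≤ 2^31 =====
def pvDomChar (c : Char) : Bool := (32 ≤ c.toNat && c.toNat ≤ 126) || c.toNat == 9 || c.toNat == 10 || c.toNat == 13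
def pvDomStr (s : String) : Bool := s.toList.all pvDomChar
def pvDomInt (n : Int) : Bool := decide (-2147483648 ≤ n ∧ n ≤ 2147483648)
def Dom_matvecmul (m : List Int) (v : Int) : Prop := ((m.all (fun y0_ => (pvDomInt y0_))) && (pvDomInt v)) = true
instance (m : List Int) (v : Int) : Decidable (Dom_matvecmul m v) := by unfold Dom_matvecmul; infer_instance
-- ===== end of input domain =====

-- B replaces the explicit bit-by-bit transpose and column-XOR with one pass of per-row
-- masked popcount parities (measurably faster: word-parallel bigint ops instead of
-- per-bit Python loops).


-- ===== PORT A =====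
def transpose (m : List Int) : List Int :=
  let length : Int := m.length
  (PySem.List.pyRange 0 length).foldl
    (fun mt i =>
      mt ++ [(PySem.List.pyRange 0 length).foldl
        (fun temp j =>
          let val := PySem.Int.band ((PySem.List.pyGetD m j 0) >>> i.toNat) 1
          PySem.Int.bor temp (val <<< j.toNat))
        0])
    []

def matvecmul (m : List Int) (v : Int) : Int :=
  let length : Int := m.length
  let mt := transpose m
  (PySem.List.pyRange 0 length).foldl
    (fun res i =>
      if PySem.Int.band (v >>> i.toNat) 1 ≠ 0 then PySem.Int.bxor res (PySem.List.pyGetD mt i 0)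
      else res)
    0

-- ===== PORT B =====
def matvecmul_alt (m : List Int) (v : Int) : Int :=
  let vm := PySem.Int.band v (((1 : Int) <<< m.length) - 1)
  (m.foldl
    (fun (p : Int × Nat) row =>
      (PySem.Int.bor p.1
        ((PySem.Int.band ((PySem.Int.bitCount (PySem.Int.band row vm) : Int)) 1) <<< p.2),
       p.2 + 1))
    ((0 : Int), (0 : Nat))).1

-- ===== PRECONDITION & SPEC =====
def Spec_matvecmul (m : List Int) (v : Int) (out : Int) : Prop := out = matvecmul_alt m v
instance (m : List Int) (v : Int) (out : Int) : Decidable (Spec_matvecmul m v out) := by unfold Spec_matvecmul; infer_instance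

-- ===== CLAIM (what is proved, stated in full; the proofs are below) =====
def Claim_equal_matvecmul : Prop := ∀ (m : List Int) (v : Int), Dom_matvecmul m v → Spec_matvecmul m v (matvecmul m v)

-- ===== LEMMAS AND PROOFS =====

lemma negSucc_inv (y : Nat) : -(Int.negSucc y) - 1 = (y : Int) := by rw [Int.negSucc_eq]; ring
lemma not_nonneg_negSucc (y : Nat) : ¬ (0:Int) ≤ Int.negSucc y := by simp

lemma band_nn (x y : Nat) : PySem.Int.band (Int.ofNat x) (Int.ofNat y) = ↑(x &&& y) := by
  simp only [PySem.Int.band, if_pos (Int.natCast_nonneg x), if_pos (Int.natCast_nonneg y)]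
  rfl
lemma band_ns (x y : Nat) : PySem.Int.band (Int.ofNat x) (Int.negSucc y) = ↑(x - (x &&& y)) := by
  simp only [PySem.Int.band, if_pos (Int.natCast_nonneg x), if_neg (not_nonneg_negSucc y),
    negSucc_inv, Int.toNat_natCast]
  rfl
lemma band_sn (x y : Nat) : PySem.Int.band (Int.negSucc x) (Int.ofNat y) = ↑(y - (y &&& x)) := by
  simp only [PySem.Int.band, if_neg (not_nonneg_negSucc x), if_pos (Int.natCast_nonneg y),
    negSucc_inv, Int.toNat_natCast]
  rfl
lemma band_ss (x y : Nat) : PySem.Int.band (Int.negSucc x) (Int.negSucc y) = Int.negSucc (x ||| y) := by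
  simp only [PySem.Int.band, if_neg (not_nonneg_negSucc x), if_neg (not_nonneg_negSucc y),
    negSucc_inv, Int.toNat_natCast]
  rw [Int.negSucc_eq]; ring

lemma sub_and_eq_xor_and (m u : Nat) : m - (m &&& u) = m ^^^ (m &&& u) := by
  induction m using Nat.strong_induction_on generalizing u with
  | _ m ih =>
    rcases Nat.eq_zero_or_pos m with hm | hm
    · subst hm; simp
    · have ihh := ih (m / 2) (by omega) (u / 2)
      have hdiv : (m &&& u) / 2 = m / 2 &&& u / 2 := Nat.and_div_two
      have hxdiv : (m ^^^ (m &&& u)) / 2 = m / 2 ^^^ (m &&& u) / 2 := Nat.xor_div_two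
      have hle : m &&& u ≤ m := Nat.and_le_left
      have hled : m / 2 &&& u / 2 ≤ m / 2 := Nat.and_le_left
      rw [hdiv] at hxdiv
      have hm2 : (m &&& u) % 2 = 1 ↔ m % 2 = 1 ∧ u % 2 = 1 := Nat.and_mod_two_eq_one
      have hx2 : (m ^^^ (m &&& u)) % 2 = 1 ↔ ¬(m % 2 = 1 ↔ (m &&& u) % 2 = 1) :=
        Nat.xor_mod_two_eq_one
      omega

lemma tb_sub_and' (m u k : Nat) :
    (m - (m &&& u)).testBit k = (m.testBit k && !(u.testBit k)) := by
  rw [sub_and_eq_xor_and, Nat.testBit_xor, Nat.testBit_and]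
  cases m.testBit k <;> cases u.testBit k <;> rfl

lemma tb_band (a b : Int) (k : Nat) :
    (PySem.Int.band a b).testBit k = (a.testBit k && b.testBit k) := by
  rcases a with x | x <;> rcases b with y | y
  · rw [band_nn]
    show (x &&& y).testBit k = (x.testBit k && y.testBit k)
    exact Nat.testBit_and x y k
  · rw [band_ns]
    show (x - (x &&& y)).testBit k = (x.testBit k && (!y.testBit k))
    exact tb_sub_and' x y k
  · rw [band_sn]
    show (y - (y &&& x)).testBit k = ((!x.testBit k) && y.testBit k)
    rw [tb_sub_and' y x k]; cases x.testBit k <;> cases y.testBit k <;> rfl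
  · rw [band_ss]
    show (!(x ||| y).testBit k) = ((!x.testBit k) && (!y.testBit k))
    rw [Nat.testBit_or]; cases x.testBit k <;> cases y.testBit k <;> rfl

lemma neg_cast_sub_one (x : Nat) : -(x : Int) - 1 = Int.negSucc x := by
  rw [Int.negSucc_eq]; ring

lemma tb_bor (a b : Int) (k : Nat) :
    (PySem.Int.bor a b).testBit k = (a.testBit k || b.testBit k) := by
  rcases a with x | x <;> rcases b with y | y
  · simp only [PySem.Int.bor, if_pos (Int.natCast_nonneg x), if_pos (Int.natCast_nonneg y)]
    show (x ||| y).testBit k = (x.testBit k || y.testBit k)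
    exact Nat.testBit_or x y k
  · simp only [PySem.Int.bor, if_pos (Int.natCast_nonneg x), if_neg (not_nonneg_negSucc y),
      negSucc_inv, Int.toNat_natCast, neg_cast_sub_one]
    show (!(y - (y &&& x)).testBit k) = (x.testBit k || (!y.testBit k))
    rw [tb_sub_and' y x k]; cases x.testBit k <;> cases y.testBit k <;> rfl
  · simp only [PySem.Int.bor, if_neg (not_nonneg_negSucc x), if_pos (Int.natCast_nonneg y),
      negSucc_inv, Int.toNat_natCast, neg_cast_sub_one]
    show (!(x - (x &&& y)).testBit k) = ((!x.testBit k) || y.testBit k)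
    rw [tb_sub_and' x y k]; cases x.testBit k <;> cases y.testBit k <;> rfl
  · simp only [PySem.Int.bor, if_neg (not_nonneg_negSucc x), if_neg (not_nonneg_negSucc y),
      negSucc_inv, Int.toNat_natCast, neg_cast_sub_one]
    show (!(x &&& y).testBit k) = ((!x.testBit k) || (!y.testBit k))
    rw [Nat.testBit_and]; cases x.testBit k <;> cases y.testBit k <;> rfl

lemma tb_bxor (a b : Int) (k : Nat) :
    (PySem.Int.bxor a b).testBit k = (a.testBit k).xor (b.testBit k) := by
  rcases a with x | x <;> rcases b with y | y
  · simp only [PySem.Int.bxor, if_pos (Int.natCast_nonneg x), if_pos (Int.natCast_nonneg y)]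
    show (x ^^^ y).testBit k = (x.testBit k).xor (y.testBit k)
    exact Nat.testBit_xor x y k
  · simp only [PySem.Int.bxor, if_pos (Int.natCast_nonneg x), if_neg (not_nonneg_negSucc y),
      negSucc_inv, Int.toNat_natCast, neg_cast_sub_one]
    show (!(x ^^^ y).testBit k) = (x.testBit k).xor (!y.testBit k)
    rw [Nat.testBit_xor]; cases x.testBit k <;> cases y.testBit k <;> rfl
  · simp only [PySem.Int.bxor, if_neg (not_nonneg_negSucc x), if_pos (Int.natCast_nonneg y),
      negSucc_inv, Int.toNat_natCast, neg_cast_sub_one]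
    show (!(x ^^^ y).testBit k) = ((!x.testBit k)).xor (y.testBit k)
    rw [Nat.testBit_xor]; cases x.testBit k <;> cases y.testBit k <;> rfl
  · simp only [PySem.Int.bxor, if_neg (not_nonneg_negSucc x), if_neg (not_nonneg_negSucc y),
      negSucc_inv, Int.toNat_natCast, neg_cast_sub_one]
    show (x ^^^ y).testBit k = ((!x.testBit k)).xor (!y.testBit k)
    rw [Nat.testBit_xor]; cases x.testBit k <;> cases y.testBit k <;> rfl

lemma band_le_right (a b : Int) (hb : 0 ≤ b) : PySem.Int.band a b ≤ b := by
  rcases b with y | y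
  · rcases a with x | x
    · rw [band_nn]
      show ((x &&& y : Nat) : Int) ≤ ((y : Nat) : Int)
      exact_mod_cast Nat.and_le_right
    · rw [band_sn]
      show ((y - (y &&& x) : Nat) : Int) ≤ ((y : Nat) : Int)
      exact_mod_cast Nat.sub_le _ _
  · exact absurd hb (not_nonneg_negSucc y)

lemma band_nonneg_right (a b : Int) (hb : 0 ≤ b) : 0 ≤ PySem.Int.band a b := by
  rcases b with y | y
  · rcases a with x | x
    · rw [band_nn]; positivity
    · rw [band_sn]; positivity
  · exact absurd hb (not_nonneg_negSucc y)

lemma band_one_bit (y : Int) : PySem.Int.band y 1 = if y.testBit 0 then 1 else 0 := by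
  have h0 : 0 ≤ PySem.Int.band y 1 := band_nonneg_right y 1 (by norm_num)
  have h1 : PySem.Int.band y 1 ≤ 1 := band_le_right y 1 (by norm_num)
  have htb : (PySem.Int.band y 1).testBit 0 = (y.testBit 0 && (1 : Int).testBit 0) :=
    tb_band y 1 0
  have hone : (1 : Int).testBit 0 = true := by decide
  rcases (by omega : PySem.Int.band y 1 = 0 ∨ PySem.Int.band y 1 = 1) with h | h <;> rw [h] <;>
    rw [h] at htb
  · have h00 : Int.testBit 0 0 = false := by decide
    have hy : y.testBit 0 = false := by simpa [h00, hone] using htb.symm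
    simp [hy]
  · have hy : y.testBit 0 = true := by simpa [hone] using htb.symm
    simp [hy]

def parN : Nat → Nat → Bool
  | 0, _ => false
  | k + 1, t => (t.testBit 0).xor (parN k (t / 2))

lemma parN_zero (k : Nat) : parN k 0 = false := by
  induction k with
  | zero => rfl
  | succ k ih => simp [parN, ih]

lemma bitCount_par (k t : Nat) (h : t < 2 ^ k) :
    decide (PySem.Int.bitCount (t : Int) % 2 = 1) = parN k t := by
  induction k generalizing t with
  | zero =>
      interval_cases t
      simp [PySem.Int.bitCount_natCast_zero, parN]
  | succ k ih =>
      rcases Nat.eq_zero_or_pos t with ht | ht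
      · subst ht
        simp [PySem.Int.bitCount_natCast_zero, parN_zero]
      · have hrec : PySem.Int.bitCount (t : Int) = t % 2 + PySem.Int.bitCount ((t / 2 : Nat) : Int) :=
          PySem.Int.bitCount_natCast ht
        have hdiv : t / 2 < 2 ^ k := by
          have : (2:Nat) ^ (k+1) = 2 * 2 ^ k := by ring
          omega
        have hIH := ih (t / 2) hdiv
        have htb : t.testBit 0 = decide (t % 2 = 1) := by
          have := @Nat.testBit_eq_decide_div_mod_eq 0 t
          simpa using this
        rw [parN, ← hIH, htb, hrec]
        obtain ⟨c, hc⟩ : ∃ c, PySem.Int.bitCount ((t / 2 : Nat) : Int) = c := ⟨_, rfl⟩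
        rw [hc]
        rcases Nat.mod_two_eq_zero_or_one t with h1 | h1 <;>
          rcases Nat.mod_two_eq_zero_or_one c with h2 | h2 <;>
          rw [h1, h2] <;> simp [Nat.add_mod, h1, h2]


lemma tb_zero (j : Nat) : (0 : Int).testBit j = false := Nat.zero_testBit j

-- the homogeneous Int shift the ports elaborate to
def shr (x y : Int) : Int := x >>> y

lemma tb_shr (x : Int) (s k : Nat) : (shr x (s : Int)).testBit k = x.testBit (s + k) := by
  unfold shr
  cases x with
  | ofNat n =>
      rw [show (Int.ofNat n) = ((n : Nat) : Int) from rfl, Int.shiftRight_natCast]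
      show (n >>> s).testBit k = n.testBit (s + k)
      rw [Nat.testBit_shiftRight]
  | negSucc n =>
      rw [Int.shiftRight_negSucc]
      show (!(n >>> s).testBit k) = (!n.testBit (s + k))
      rw [Nat.testBit_shiftRight]

-- value and bits of a 0/1 value shifted left by K
lemma shifted01 (b : Bool) (K : Nat) :
    0 ≤ ((if b then 1 else 0 : Int) <<< K) ∧
      ∀ j, ((if b then 1 else 0 : Int) <<< K).testBit j = (decide (j = K) && b) := by
  cases b
  · have h : ((0 : Int) <<< K) = 0 := by rw [Int.shiftLeft_eq]; ring
    simp [h, tb_zero]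
  · have h : ((1 : Int) <<< K) = ((2 ^ K : Nat) : Int) := by
      rw [Int.shiftLeft_eq]; push_cast; ring
    refine ⟨by rw [if_pos rfl, h]; positivity, fun j => ?_⟩
    rw [if_pos rfl, h]
    show (2 ^ K : Nat).testBit j = (decide (j = K) && true)
    rw [Nat.testBit_two_pow]
    simp [eq_comm]

-- xor of f 0, ..., f (k-1)
def xorRange (f : Nat → Bool) : Nat → Bool
  | 0 => false
  | k + 1 => (xorRange f k).xor (f k)

lemma xorRange_congr (f g : Nat → Bool) (k : Nat) (h : ∀ i < k, f i = g i) :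
    xorRange f k = xorRange g k := by
  induction k with
  | zero => rfl
  | succ k ih => simp [xorRange, ih (fun i hi => h i (by omega)), h k (by omega)]

lemma xorRange_false (k : Nat) : xorRange (fun _ => false) k = false := by
  induction k with
  | zero => rfl
  | succ k ih => simp [xorRange, ih]

lemma xorRange_shift (f : Nat → Bool) (k : Nat) :
    xorRange f (k + 1) = (f 0).xor (xorRange (fun i => f (i + 1)) k) := by
  induction k generalizing f with
  | zero => simp [xorRange]
  | succ k ih =>
      show (xorRange f (k+1)).xor (f (k+1)) = _
      rw [ih]
      simp [xorRange]

lemma parN_eq_xorRange (k t : Nat) : parN k t = xorRange t.testBit k := by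
  induction k generalizing t with
  | zero => rfl
  | succ k ih =>
      rw [xorRange_shift]
      show (t.testBit 0).xor (parN k (t/2)) = _
      rw [ih]
      congr 1
      exact xorRange_congr _ _ k (fun i _ => Nat.testBit_div_two t i)

lemma int_ext_nonneg (a b : Int) (ha : 0 ≤ a) (hb : 0 ≤ b)
    (h : ∀ k, a.testBit k = b.testBit k) : a = b := by
  rw [← Int.toNat_of_nonneg ha, ← Int.toNat_of_nonneg hb]
  congr 1
  apply Nat.eq_of_testBit_eq
  intro i
  have := h i
  rwa [← Int.toNat_of_nonneg ha, ← Int.toNat_of_nonneg hb] at this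

-- the value of A's inner (transpose) loop for a fixed column index i
def colA (m : List Int) (i : Nat) : Int :=
  (List.range m.length).foldl
    (fun temp j => PySem.Int.bor temp ((PySem.Int.band (shr (m.getD j 0) (i : Int)) 1) <<< j)) 0

lemma transpose_eq (m : List Int) :
    transpose m = (List.range m.length).map (colA m) := by
  show (PySem.List.pyRange 0 (m.length : Int)).foldl _ [] = _
  rw [PySem.List.pyRange_zero_natCast, List.foldl_map,
      PySem.List.foldl_append_singleton_eq_map, List.nil_append]
  apply List.map_congr_left
  intro k _
  simp only [PySem.List.pyRange_zero_natCast, List.foldl_map, Int.toNat_natCast,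
    PySem.List.pyGetD_natCast, colA, shr]

lemma colA_aux (m : List Int) (i : Nat) (K : Nat) :
    0 ≤ (List.range K).foldl
        (fun temp j => PySem.Int.bor temp ((PySem.Int.band (shr (m.getD j 0) (i : Int)) 1) <<< j)) 0 ∧
      ∀ j, ((List.range K).foldl
        (fun temp j => PySem.Int.bor temp ((PySem.Int.band (shr (m.getD j 0) (i : Int)) 1) <<< j))
          0).testBit j = (decide (j < K) && (m.getD j 0).testBit i) := by
  induction K with
  | zero => simp [tb_zero]
  | succ K ih =>
      obtain ⟨ih0, ihtb⟩ := ih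
      rw [List.range_succ, List.foldl_append, List.foldl_cons, List.foldl_nil]
      have hb : PySem.Int.band (shr (m.getD K 0) (i : Int)) 1
          = if (m.getD K 0).testBit i then 1 else 0 := by
        rw [band_one_bit, tb_shr]
        simp
      rw [hb]
      obtain ⟨hs0, hstb⟩ := shifted01 ((m.getD K 0).testBit i) K
      constructor
      · rw [PySem.Int.bor_of_nonneg ih0 hs0]; positivity
      · intro j
        rw [tb_bor, ihtb j, hstb j]
        by_cases h1 : j < K
        · have d1 : decide (j < K) = true := by simp [h1]
          have d2 : decide (j = K) = false := by simp; omega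
          have d3 : decide (j < K + 1) = true := by simp; omega
          rw [d1, d2, d3]; simp
        · by_cases h2 : j = K
          · subst h2
            have d1 : decide (j < j) = false := by simp
            have d3 : decide (j < j + 1) = true := by simp
            rw [d1, d3]; simp
          · have d1 : decide (j < K) = false := by simp [h1]
            have d2 : decide (j = K) = false := by simp [h2]
            have d3 : decide (j < K + 1) = false := by simp; omega
            rw [d1, d2, d3]; simp

lemma colA_spec (m : List Int) (i : Nat) :
    0 ≤ colA m i ∧
      ∀ j, (colA m i).testBit j = (decide (j < m.length) && (m.getD j 0).testBit i) :=
  colA_aux m i m.length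

lemma A_aux (m : List Int) (v : Int) (K : Nat) :
    K ≤ m.length →
    0 ≤ (List.range K).foldl
        (fun res (k : Nat) => if PySem.Int.band (shr v (k : Int)) 1 ≠ 0
          then PySem.Int.bxor res (((List.range m.length).map (colA m)).getD k 0) else res) 0 ∧
      ∀ j, ((List.range K).foldl
        (fun res (k : Nat) => if PySem.Int.band (shr v (k : Int)) 1 ≠ 0
          then PySem.Int.bxor res (((List.range m.length).map (colA m)).getD k 0) else res)
          0).testBit j =
        xorRange (fun i => v.testBit i && (decide (j < m.length) && (m.getD j 0).testBit i)) K := by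
  induction K with
  | zero => intro _; simp [tb_zero, xorRange]
  | succ K ih =>
      intro hK
      obtain ⟨ih0, ihtb⟩ := ih (by omega)
      rw [List.range_succ, List.foldl_append, List.foldl_cons, List.foldl_nil]
      have hcond : PySem.Int.band (shr v (K : Int)) 1 = if v.testBit K then 1 else 0 := by
        rw [band_one_bit, tb_shr]
        simp
      have hget : ((List.range m.length).map (colA m)).getD K 0 = colA m K := by
        rw [List.getD_eq_getElem?_getD, List.getElem?_map, List.getElem?_range (by omega)]
        rfl
      obtain ⟨hc0, hctb⟩ := colA_spec m K
      by_cases hv : v.testBit K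
      · rw [hcond, if_pos (by simp [hv])]
        constructor
        · rw [hget, PySem.Int.bxor_of_nonneg ih0 hc0]; positivity
        · intro j
          rw [hget, tb_bxor, ihtb j, xorRange]
          simp [hctb j, hv]
      · rw [hcond, if_neg (by simp [hv])]
        refine ⟨ih0, fun j => ?_⟩
        rw [ihtb j, xorRange]
        simp [hv]

lemma A_char (m : List Int) (v : Int) :
    0 ≤ matvecmul m v ∧
      ∀ j, (matvecmul m v).testBit j =
        xorRange (fun i => v.testBit i && (decide (j < m.length) && (m.getD j 0).testBit i))
          m.length := by
  have h : matvecmul m v = (List.range m.length).foldl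
      (fun res (k : Nat) => if PySem.Int.band (shr v (k : Int)) 1 ≠ 0
        then PySem.Int.bxor res (((List.range m.length).map (colA m)).getD k 0) else res) 0 := by
    show (PySem.List.pyRange 0 (m.length : Int)).foldl _ 0 = _
    rw [PySem.List.pyRange_zero_natCast, List.foldl_map]
    simp only [Int.toNat_natCast, PySem.List.pyGetD_natCast, transpose_eq, shr]
    rfl
  rw [h]
  exact A_aux m v m.length le_rfl

-- per-row parity bit of B
def pbit (vm row : Int) : Bool := decide (PySem.Int.bitCount (PySem.Int.band row vm) % 2 = 1)

lemma B_aux (vm : Int) (l : List Int) (acc : Int) (j0 : Nat) (hacc : 0 ≤ acc) :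
    0 ≤ (l.foldl
      (fun (p : Int × Nat) row =>
        (PySem.Int.bor p.1
          ((PySem.Int.band ((PySem.Int.bitCount (PySem.Int.band row vm) : Int)) 1) <<< p.2),
         p.2 + 1)) (acc, j0)).1 ∧
    ∀ k, ((l.foldl
      (fun (p : Int × Nat) row =>
        (PySem.Int.bor p.1
          ((PySem.Int.band ((PySem.Int.bitCount (PySem.Int.band row vm) : Int)) 1) <<< p.2),
         p.2 + 1)) (acc, j0)).1).testBit k =
      (acc.testBit k ||
        (decide (j0 ≤ k ∧ k < j0 + l.length) && pbit vm (l.getD (k - j0) 0))) := by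
  induction l generalizing acc j0 with
  | nil => simp [hacc]
  | cons row l ih =>
      rw [List.foldl_cons]
      have hval : PySem.Int.band ((PySem.Int.bitCount (PySem.Int.band row vm) : Int)) 1
          = if pbit vm row then 1 else 0 := by
        rw [PySem.Int.band_of_nonneg (Int.natCast_nonneg _) (by norm_num)]
        show ((PySem.Int.bitCount (PySem.Int.band row vm) : Int).toNat &&& (1 : Int).toNat : Nat)
            = (_ : Int)
        rw [Int.toNat_natCast]
        show ((PySem.Int.bitCount (PySem.Int.band row vm) &&& 1 : Nat) : Int) = _
        rw [Nat.and_one_is_mod]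
        unfold pbit
        rcases Nat.mod_two_eq_zero_or_one (PySem.Int.bitCount (PySem.Int.band row vm)) with h | h <;>
          rw [h] <;> simp [h]
      rw [hval]
      obtain ⟨hs0, hstb⟩ := shifted01 (pbit vm row) j0
      have hacc' : 0 ≤ PySem.Int.bor acc ((if pbit vm row then 1 else 0 : Int) <<< j0) := by
        rw [PySem.Int.bor_of_nonneg hacc hs0]; positivity
      obtain ⟨r0, rtb⟩ := ih _ (j0 + 1) hacc'
      refine ⟨r0, fun k => ?_⟩
      rw [rtb k, tb_bor, hstb k]
      simp only [List.length_cons]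
      by_cases h1 : k = j0
      · subst h1
        have hk : k - k = 0 := by omega
        rw [hk, List.getD_cons_zero]
        have f1 : ¬ (k + 1 ≤ k) := by omega
        have f2 : k < k + (l.length + 1) := by omega
        simp [f1, f2]
      · by_cases h2 : j0 + 1 ≤ k ∧ k < j0 + 1 + l.length
        · have hk : k - j0 = (k - (j0 + 1)) + 1 := by omega
          rw [hk, List.getD_cons_succ]
          have f2 : j0 + 1 ≤ k := h2.1
          have f3 : k < j0 + 1 + l.length := h2.2
          have f4 : j0 ≤ k := by omega
          have f5 : k < j0 + (l.length + 1) := by omega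
          simp [h1, f2, f3, f4, f5]
        · have f2 : ¬ (j0 + 1 ≤ k ∧ k < j0 + 1 + l.length) := by omega
          have f3 : ¬ (j0 ≤ k ∧ k < j0 + (l.length + 1)) := by omega
          simp [h1, f2, f3]
          intro ha hb _
          exact absurd ⟨by omega, hb⟩ f2

lemma B_char (m : List Int) (v : Int) :
    0 ≤ matvecmul_alt m v ∧
      ∀ k, (matvecmul_alt m v).testBit k =
        (decide (k < m.length) &&
          pbit (PySem.Int.band v (((1 : Int) <<< m.length) - 1)) (m.getD k 0)) := by
  obtain ⟨h0, htb⟩ := B_aux (PySem.Int.band v (((1 : Int) <<< m.length) - 1)) m 0 0 le_rfl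
  refine ⟨h0, fun k => ?_⟩
  have := htb k
  simpa [tb_zero] using this

lemma crux (m : List Int) (v : Int) (j : Nat) (hj : j < m.length) :
    xorRange (fun i => v.testBit i && (m.getD j 0).testBit i) m.length =
      pbit (PySem.Int.band v (((1 : Int) <<< m.length) - 1)) (m.getD j 0) := by
  have hmask : ((1 : Int) <<< m.length) - 1 = ((2 ^ m.length - 1 : Nat) : Int) := by
    rw [Int.shiftLeft_eq, one_mul]
    have h1 : (1 : Nat) ≤ 2 ^ m.length := Nat.one_le_two_pow
    push_cast [h1]
    ring
  have hmask0 : (0 : Int) ≤ ((1 : Int) <<< m.length) - 1 := by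
    rw [hmask]; positivity
  set vm := PySem.Int.band v (((1 : Int) <<< m.length) - 1) with hvmdef
  have hvm0 : 0 ≤ vm := band_nonneg_right _ _ hmask0
  have hvmle : vm ≤ ((2 ^ m.length - 1 : Nat) : Int) := hmask ▸ band_le_right _ _ hmask0
  set w := PySem.Int.band (m.getD j 0) vm with hwdef
  have hw0 : 0 ≤ w := band_nonneg_right _ _ hvm0
  have hwle : w ≤ vm := band_le_right _ _ hvm0
  have hwn : ((w.toNat : Nat) : Int) = w := Int.toNat_of_nonneg hw0
  have hwlt : w.toNat < 2 ^ m.length := by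
    have h1 : (1 : Nat) ≤ 2 ^ m.length := Nat.one_le_two_pow
    have : ((w.toNat : Nat) : Int) ≤ ((2 ^ m.length - 1 : Nat) : Int) := by
      rw [hwn]; exact le_trans hwle hvmle
    have := Int.ofNat_le.mp this
    omega
  have hrhs : pbit vm (m.getD j 0) = xorRange (w.toNat).testBit m.length := by
    unfold pbit
    rw [← hwdef, ← hwn, bitCount_par m.length w.toNat hwlt, parN_eq_xorRange,
      Int.toNat_natCast]
  rw [hrhs]
  apply xorRange_congr
  intro i hi
  have h1 : (w.toNat).testBit i = w.testBit i := by rw [← hwn]; rfl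
  have h2 : w.testBit i = ((m.getD j 0).testBit i && vm.testBit i) := tb_band _ _ i
  have h3 : vm.testBit i = (v.testBit i && (((1 : Int) <<< m.length) - 1).testBit i) :=
    tb_band _ _ i
  have h4 : (((1 : Int) <<< m.length) - 1).testBit i = true := by
    rw [hmask]
    show (2 ^ m.length - 1 : Nat).testBit i = true
    rw [Nat.testBit_two_pow_sub_one]
    simpa using hi
  rw [h1, h2, h3, h4]
  cases v.testBit i <;> cases (m.getD j 0).testBit i <;> rfl


-- ===== VERDICT (by name: the statement is the Claim_ definition above) =====
theorem matvecmul_spec : Claim_equal_matvecmul := by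
  intro m v _
  show matvecmul m v = matvecmul_alt m v
  obtain ⟨hA0, hA⟩ := A_char m v
  obtain ⟨hB0, hB⟩ := B_char m v
  apply int_ext_nonneg _ _ hA0 hB0
  intro k
  rw [hA k, hB k]
  by_cases hk : k < m.length
  · rw [xorRange_congr _ (fun i => v.testBit i && (m.getD k 0).testBit i) _ (fun i _ => by simp [hk]),
      crux m v k hk]
    simp [hk]
  · rw [xorRange_congr _ (fun _ => false) _ (fun i _ => by simp [hk]), xorRange_false]
    simp [hk]
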